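-- pv_equiv track=rewrite | github.com/Flexlolo/aoc2021 | 15/main.py | extend_down
-- ===== SOURCE A (Python) =====
-- def extend_down(lines):
-- 	lines_new = []
--
-- 	for step in range(5):
-- 		for line in lines:
-- 			line_new = []
--
-- 			for n in line:
-- 				m = (n - 1 + step) % 9 + 1
-- 				line_new.append(m)
--
-- 			lines_new.append(tuple(line_new))
--
-- 	return tuple(lines_new)
-- ===== SOURCE B (Python) =====
-- def extend_down(lines):
-- 	block = [tuple((n - 1) % 9 + 1 for n in row) for row in lines]
-- 	out = []
-- 	for _ in range(5):
-- 		out.extend(block)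
-- 		block = [tuple(v % 9 + 1 for v in row) for row in block]
-- 	return tuple(out)
-- ===== Notes on version B (the rewrite author's own statement) =====
-- stated objective: alternative
-- what changed: Instead of recomputing every cell from the original value and the step index in a triple nested loop, B normalizes the grid once into block 0 and then repeatedly appends the current block and derives the next block by the wrap-increment v%9+1.
import Mathlib
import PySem

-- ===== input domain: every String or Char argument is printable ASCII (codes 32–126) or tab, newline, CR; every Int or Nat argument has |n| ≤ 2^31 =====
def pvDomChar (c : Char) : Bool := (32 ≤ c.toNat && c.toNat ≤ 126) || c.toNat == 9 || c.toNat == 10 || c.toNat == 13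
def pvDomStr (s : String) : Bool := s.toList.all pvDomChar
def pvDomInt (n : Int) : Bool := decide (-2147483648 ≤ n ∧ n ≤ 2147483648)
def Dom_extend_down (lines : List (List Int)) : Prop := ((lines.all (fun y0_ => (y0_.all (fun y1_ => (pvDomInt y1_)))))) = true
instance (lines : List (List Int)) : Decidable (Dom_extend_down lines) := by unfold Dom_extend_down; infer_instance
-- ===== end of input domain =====

-- B maintains the previous tile and wrap-increments it instead of recomputing each cell from the original value and the step index; objective: alternative decomposition (same cost).

-- ===== PORT A =====
def extend_down (lines : List (List Int)) : List (List Int) :=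
  (PySem.List.pyRange 0 5 1).foldl (fun lines_new step =>
    lines.foldl (fun lines_new line =>
      lines_new ++ [line.foldl (fun line_new n =>
        line_new ++ [PySem.Int.mod (n - 1 + step) 9 + 1]) []]) lines_new) []

-- ===== PORT B =====
def extend_down_alt (lines : List (List Int)) : List (List Int) :=
  let block0 := lines.map (fun row => row.map (fun n => PySem.Int.mod (n - 1) 9 + 1))
  ((List.range 5).foldl
    (fun (st : List (List Int) × List (List Int)) _ =>
      (st.1 ++ st.2, st.2.map (fun row => row.map (fun v => PySem.Int.mod v 9 + 1))))
    ([], block0)).1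

-- ===== PRECONDITION & SPEC =====
def Spec_extend_down (lines : List (List Int)) (out : List (List Int)) : Prop := out = extend_down_alt lines
instance (lines : List (List Int)) (out : List (List Int)) : Decidable (Spec_extend_down lines out) := by unfold Spec_extend_down; infer_instance

-- ===== CLAIM (what is proved, stated in full; the proofs are below) =====
def Claim_equal_extend_down : Prop := ∀ (lines : List (List Int)), Dom_extend_down lines → Spec_extend_down lines (extend_down lines)

-- ===== LEMMAS AND PROOFS =====

-- canonical block at step k
def pvBlk (k : Int) (lines : List (List Int)) : List (List Int) :=
  lines.map (fun row => row.map (fun n => PySem.Int.mod (n - 1 + k) 9 + 1))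

theorem pv_foldl_app {α β : Type} (g : α → β) (l : List α) (acc : List β) :
    l.foldl (fun r n => r ++ [g n]) acc = acc ++ l.map g := by
  induction l generalizing acc with
  | nil => simp
  | cons x xs ih => simp [List.foldl, ih]

theorem pv_outer (g : Int → Int) (lines : List (List Int)) (acc : List (List Int)) :
    lines.foldl (fun r line => r ++ [line.foldl (fun q n => q ++ [g n]) []]) acc
      = acc ++ lines.map (fun line => line.map g) := by
  induction lines generalizing acc with
  | nil => simp
  | cons x xs ih =>
      rw [List.foldl_cons, ih, pv_foldl_app]
      simp

theorem pv_inc_blk (k : Int) (lines : List (List Int)) :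
    (pvBlk k lines).map (fun row => row.map (fun v => PySem.Int.mod v 9 + 1))
      = pvBlk (k + 1) lines := by
  unfold pvBlk
  rw [List.map_map]
  apply List.map_congr_left
  intro row _
  simp only [Function.comp, List.map_map]
  apply List.map_congr_left
  intro n _
  simp only [Function.comp]
  rw [PySem.Int.mod_eq_emod_of_pos (by norm_num : (0:Int) < 9),
      PySem.Int.mod_eq_emod_of_pos (by norm_num : (0:Int) < 9),
      PySem.Int.mod_eq_emod_of_pos (by norm_num : (0:Int) < 9)]
  omega

theorem pv_A_eq (lines : List (List Int)) :
    extend_down lines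
      = pvBlk 0 lines ++ pvBlk 1 lines ++ pvBlk 2 lines ++ pvBlk 3 lines ++ pvBlk 4 lines := by
  unfold extend_down
  have hR : PySem.List.pyRange 0 5 1 = [0, 1, 2, 3, 4] := by decide
  rw [hR]
  simp only [List.foldl, pv_outer, List.nil_append]
  rfl

theorem pv_B_eq (lines : List (List Int)) :
    extend_down_alt lines
      = pvBlk 0 lines ++ pvBlk 1 lines ++ pvBlk 2 lines ++ pvBlk 3 lines ++ pvBlk 4 lines := by
  unfold extend_down_alt
  have h0 : lines.map (fun row => row.map (fun n => PySem.Int.mod (n - 1) 9 + 1)) = pvBlk 0 lines := by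
    unfold pvBlk; simp
  simp only [List.range_succ, List.range_zero, List.nil_append, List.foldl_append,
    List.foldl_cons, List.foldl_nil, h0, pv_inc_blk]
  norm_num

-- ===== VERDICT (by name: the statement is the Claim_ definition above) =====
theorem extend_down_spec : Claim_equal_extend_down := by
  intro lines _
  unfold Spec_extend_down
  rw [pv_A_eq, pv_B_eq]
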